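-- pv_equiv track=rewrite | github.com/DimitraGkini123/verifier_wifi_2level | policy_2level_lr.py | _device_key
-- ===== SOURCE A (Python) =====
-- def _device_key(device_id: str) -> int:
--     digits = ""
--     for ch in reversed(str(device_id)):
--         if ch.isdigit():
--             digits = ch + digits
--         elif digits:
--             break
--     if not digits:
--         raise ValueError(f"Cannot parse numeric id from device_id={device_id!r}")
--     return int(digits)
-- ===== SOURCE B (Python) =====
-- from itertools import groupby
--
-- def _device_key(device_id: str) -> int:
--     runs = ["".join(g) for is_digit, g in groupby(str(device_id), str.isdigit) if is_digit]
--     if not runs: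
--         raise ValueError(f"Cannot parse numeric id from device_id={device_id!r}")
--     return int(runs[-1])
-- ===== Notes on version B (the rewrite author's own statement) =====
-- stated objective: idiomatic
-- what changed: Replaces the reversed character-by-character accumulate-and-break loop with a forward itertools.groupby pass that materialises all maximal digit runs and returns int of the last one.
-- outside the precondition, e.g. on _device_key('abc'): A raises ValueError, B raises ValueError
import Mathlib
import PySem

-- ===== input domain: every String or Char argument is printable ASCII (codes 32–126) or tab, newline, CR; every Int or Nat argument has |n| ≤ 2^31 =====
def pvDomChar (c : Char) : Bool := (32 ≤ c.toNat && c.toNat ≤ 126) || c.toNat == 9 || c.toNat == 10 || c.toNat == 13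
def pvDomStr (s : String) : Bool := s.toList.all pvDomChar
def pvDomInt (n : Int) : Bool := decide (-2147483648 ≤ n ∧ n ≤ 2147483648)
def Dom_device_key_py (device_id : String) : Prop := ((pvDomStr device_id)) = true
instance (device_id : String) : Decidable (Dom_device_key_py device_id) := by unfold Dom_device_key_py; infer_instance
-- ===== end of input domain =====

-- B is the same task written idiomatically: a forward pass over digit runs instead of A's
-- reversed accumulate-and-break loop; equivalence is claimed on strings containing a digit
-- (on the rest A raises ValueError).

-- ===== PORT A =====
-- the reversed for-loop: digits accumulator, break on a non-digit once digits is nonempty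
def aLoop : List Char → List Char → List Char
  | [], digits => digits
  | ch :: rest, digits =>
    if PySem.Chars.isdigit ch then aLoop rest (ch :: digits)
    else if digits ≠ [] then digits
    else aLoop rest digits

def device_key_py (device_id : String) : Int :=
  let digits := aLoop device_id.toList.reverse []
  if digits = [] then 0  -- Python raises ValueError here; excluded by Pre_
  else (PySem.Int.ofChars? digits).getD 0

-- ===== PORT B =====
-- forward groupby: collect the maximal digit runs (cur holds the current run reversed)
def digitRuns : List Char → List Char → List (List Char)
  | [], cur => if cur = [] then [] else [cur.reverse]
  | ch :: rest, cur =>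
    if PySem.Chars.isdigit ch then digitRuns rest (ch :: cur)
    else if cur = [] then digitRuns rest []
    else cur.reverse :: digitRuns rest []

def device_key_py_alt (device_id : String) : Int :=
  match (digitRuns device_id.toList []).getLast? with
  | none => 0  -- Python raises ValueError here; excluded by Pre_
  | some run => (PySem.Int.ofChars? run).getD 0

-- ===== PRECONDITION & SPEC =====
-- Python A raises ValueError exactly when the string contains no digit character; B does the same.
def Pre_device_key_py (device_id : String) : Prop :=
  device_id.toList.any PySem.Chars.isdigit = true
instance (device_id : String) : Decidable (Pre_device_key_py device_id) := by
  unfold Pre_device_key_py; infer_instance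
def pvWitness_device_key_py : String := "dev-007a"
def Spec_device_key_py (device_id : String) (out : Int) : Prop := out = device_key_py_alt device_id
instance (device_id : String) (out : Int) : Decidable (Spec_device_key_py device_id out) := by unfold Spec_device_key_py; infer_instance

-- ===== CLAIM (what is proved, stated in full; the proofs are below) =====
def Claim_equal_device_key_py : Prop := ∀ (device_id : String), Dom_device_key_py device_id → Pre_device_key_py device_id → Spec_device_key_py device_id (device_key_py device_id)

-- ===== LEMMAS AND PROOFS =====

-- nd c = "c is not a digit", kept as a Bool predicate
def nd (c : Char) : Bool := !PySem.Chars.isdigit c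

-- the first maximal digit run of a list, reversed-or-none; both ports reduce to it
def F (m : List Char) : Option (List Char) :=
  let r := (m.dropWhile nd).takeWhile PySem.Chars.isdigit
  if r = [] then none else some r.reverse

theorem aLoop_acc (m acc : List Char) (h : acc ≠ []) :
    aLoop m acc = (m.takeWhile PySem.Chars.isdigit).reverse ++ acc := by
  induction m generalizing acc with
  | nil => simp [aLoop]
  | cons c rest ih =>
    by_cases hd : PySem.Chars.isdigit c
    · simp [aLoop, hd, ih (c :: acc) (by simp), List.takeWhile_cons]
    · simp [aLoop, hd, h, List.takeWhile_cons]

theorem aLoop_nil (m : List Char) :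
    aLoop m [] = ((m.dropWhile nd).takeWhile PySem.Chars.isdigit).reverse := by
  induction m with
  | nil => simp [aLoop]
  | cons c rest ih =>
    by_cases hd : PySem.Chars.isdigit c
    · simp [aLoop, hd, aLoop_acc rest [c] (by simp), List.dropWhile_cons, List.takeWhile_cons, nd]
    · simpa [aLoop, hd, List.dropWhile_cons, nd] using ih

theorem takeWhile_append_not {c : Char} (hd : nd c = true) (x y : List Char) :
    (x ++ c :: y).takeWhile PySem.Chars.isdigit = x.takeWhile PySem.Chars.isdigit := by
  have hc : PySem.Chars.isdigit c = false := by simpa [nd] using hd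
  induction x with
  | nil => simp [List.takeWhile_cons, hc]
  | cons a x' ih =>
    by_cases ha : PySem.Chars.isdigit a <;> simp [List.takeWhile_cons, ha, ih]

theorem all_digit_drop_take (cur : List Char) (hcur : cur.all PySem.Chars.isdigit = true) :
    cur.dropWhile nd = cur ∧ cur.takeWhile PySem.Chars.isdigit = cur := by
  induction cur with
  | nil => simp
  | cons a cs ih =>
    simp only [List.all_cons, Bool.and_eq_true] at hcur
    refine ⟨?_, ?_⟩
    · simp [List.dropWhile_cons, nd, hcur.1]
    · simp [List.takeWhile_cons, hcur.1, (ih hcur.2).2]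

theorem F_none_iff (x : List Char) : F x = none ↔ x.all nd = true := by
  induction x with
  | nil => simp [F]
  | cons a x' ih =>
    by_cases ha : PySem.Chars.isdigit a
    · simp [F, List.dropWhile_cons, List.takeWhile_cons, nd, ha]
    · simpa [F, List.dropWhile_cons, nd, ha] using ih

theorem F_append (x : List Char) (c : Char) (cur : List Char)
    (hc : nd c = true) (hcur : cur.all PySem.Chars.isdigit = true) :
    F (x ++ c :: cur) =
      if x.all nd then (if cur = [] then none else some cur.reverse) else F x := by
  induction x with
  | nil =>
    obtain ⟨hdw, htw⟩ := all_digit_drop_take cur hcur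
    simp [F, List.dropWhile_cons, hc, hdw, htw]
  | cons a x' ih =>
    by_cases ha : PySem.Chars.isdigit a
    · simp [F, List.dropWhile_cons, List.takeWhile_cons, nd, ha,
        takeWhile_append_not hc]
    · simpa [F, List.dropWhile_cons, List.all_cons, nd, ha] using ih

theorem digitRuns_last (l : List Char) (cur : List Char)
    (hcur : cur.all PySem.Chars.isdigit = true) :
    (digitRuns l cur).getLast? = F (l.reverse ++ cur) := by
  induction l generalizing cur with
  | nil =>
    obtain ⟨hdw, htw⟩ := all_digit_drop_take cur hcur
    cases cur with
    | nil => simp [digitRuns, F]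
    | cons a cs => simp [digitRuns, F, hdw, htw]
  | cons c rest ih =>
    by_cases hd : PySem.Chars.isdigit c
    · have h1 : (c :: cur).all PySem.Chars.isdigit = true := by simp_all
      rw [show (c :: rest).reverse ++ cur = rest.reverse ++ (c :: cur) by simp]
      simpa [digitRuns, hd] using ih (c :: cur) h1
    · have hndc : nd c = true := by simp [nd, hd]
      have hrecur : (digitRuns rest []).getLast? = F rest.reverse := by
        simpa using ih [] (by simp)
      rw [show (c :: rest).reverse ++ cur = rest.reverse ++ c :: cur by simp]
      rw [F_append rest.reverse c cur hndc hcur]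
      by_cases hcurnil : cur = []
      · subst hcurnil
        by_cases hall : rest.reverse.all nd
        · have : F rest.reverse = none := (F_none_iff _).2 hall
          simp [digitRuns, hd, hrecur, hall, this]
        · simp [digitRuns, hd, hrecur, hall]
      · by_cases hrs : digitRuns rest [] = []
        · have hFnone : F rest.reverse = none := by rw [← hrecur, hrs]; simp
          have hall : rest.reverse.all nd = true := (F_none_iff _).1 hFnone
          simp [digitRuns, hd, hcurnil, hrs, hall]
        · have hFsome : F rest.reverse ≠ none := by rw [← hrecur]; simpa using hrs
          have hall : rest.reverse.all nd = false := by
            by_contra h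
            exact hFsome ((F_none_iff _).2 (by simpa using h))
          have hlast : (cur.reverse :: digitRuns rest []).getLast? = (digitRuns rest []).getLast? := by
            cases h : digitRuns rest [] with
            | nil => exact absurd h hrs
            | cons b bs => simp [List.getLast?_cons_cons]
          rw [show digitRuns (c :: rest) cur = cur.reverse :: digitRuns rest [] by
                simp [digitRuns, hd, hcurnil]]
          rw [hlast, hrecur, hall]
          simp

theorem device_key_py_eq_alt (s : String) :
    device_key_py s = device_key_py_alt s := by
  have hA := aLoop_nil s.toList.reverse
  have hB := digitRuns_last s.toList [] (by simp)
  simp only [List.append_nil] at hB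
  unfold device_key_py device_key_py_alt
  rw [hB, hA]
  unfold F
  by_cases h : (s.toList.reverse.dropWhile nd).takeWhile PySem.Chars.isdigit = []
  · rw [h]; simp
  · rw [if_neg h]; simp [h]

-- ===== VERDICT (by name: the statement is the Claim_ definition above) =====
theorem device_key_py_spec : Claim_equal_device_key_py := by
  intro s _ _
  unfold Spec_device_key_py
  exact device_key_py_eq_alt s
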